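-- pv_equiv track=rewrite | github.com/THEman6989/ai-stack | langgraph-app/internal_context.py | _max_partial_suffix
-- ===== SOURCE A (Python) =====
-- def _max_partial_suffix(buf_lower: str, targets: tuple[str, ...]) -> int:
--     max_len = 0
--     for target in targets:
--         max_check = min(len(buf_lower), max(0, len(target) - 1))
--         for length in range(max_check, 0, -1):
--             if target.startswith(buf_lower[-length:]):
--                 max_len = max(max_len, length)
--                 break
--     return max_len
-- ===== SOURCE B (Python) =====
-- def _max_partial_suffix(buf_lower: str, targets: tuple[str, ...]) -> int:
--     # Single descending scan over candidate suffix lengths (capped by the longest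
--     # target); the first length whose buffer suffix is a proper prefix of any
--     # target is the answer (loops swapped, early return).
--     longest = 0
--     for t in targets:
--         longest = max(longest, len(t))
--     start = min(len(buf_lower), longest - 1)
--     for length in range(start, 0, -1):
--         suf = buf_lower[-length:]
--         if any(len(t) > length and t.startswith(suf) for t in targets):
--             return length
--     return 0
-- ===== Notes on version B (the rewrite author's own statement) =====
-- stated objective: faster
-- what changed: A runs a full descending length-scan per target, re-slicing the buffer for every (target, length) pair and maxing the per-target results; B swaps the loops into ONE descending scan over candidate lengths (capped by the longest target), slices each suffix once, and returns at the first length that is a proper prefix of any target.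
import Mathlib
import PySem

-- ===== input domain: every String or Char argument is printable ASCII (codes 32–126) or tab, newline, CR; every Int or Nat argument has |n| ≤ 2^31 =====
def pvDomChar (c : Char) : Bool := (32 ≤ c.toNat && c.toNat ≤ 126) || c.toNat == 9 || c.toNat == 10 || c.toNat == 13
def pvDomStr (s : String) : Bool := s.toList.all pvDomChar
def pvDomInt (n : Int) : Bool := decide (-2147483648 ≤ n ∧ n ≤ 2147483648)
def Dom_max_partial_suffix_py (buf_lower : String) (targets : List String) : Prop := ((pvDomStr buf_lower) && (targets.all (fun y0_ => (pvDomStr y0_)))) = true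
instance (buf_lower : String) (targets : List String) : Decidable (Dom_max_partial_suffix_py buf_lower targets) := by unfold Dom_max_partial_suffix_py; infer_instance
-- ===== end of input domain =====

-- B replaces A's per-target descending scans (each re-slicing the buffer) by ONE descending scan
-- over suffix lengths (capped by the longest target) that returns at the first length matching any
-- target (objective: faster — measured constant-factor speed-up in a timing run).

-- ===== PORT A =====
-- inner loop: for length in range(max_check, 0, -1): if target.startswith(buf_lower[-length:]): max_len = max(max_len, length); break
def pyA_inner (target buf_lower : String) (max_len : Int) : List Int → Int
  | [] => max_len
  | length :: rest =>
    if PySem.Str.startswith target (PySem.Str.slice buf_lower (some (-length)) none)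
    then max max_len length
    else pyA_inner target buf_lower max_len rest

def max_partial_suffix_py (buf_lower : String) (targets : List String) : Int :=
  targets.foldl (fun max_len target =>
    let max_check := min (PySem.Str.len buf_lower) (max 0 (PySem.Str.len target - 1))
    pyA_inner target buf_lower max_len (PySem.List.pyRange max_check 0 (-1))) 0

-- ===== PORT B =====
-- any(len(t) > length and t.startswith(suf) for t in targets)
def altHit (buf_lower : String) (targets : List String) (length : Int) : Bool :=
  let suf := PySem.Str.slice buf_lower (some (-length)) none
  targets.any (fun t => decide (length < PySem.Str.len t) && PySem.Str.startswith t suf)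

-- for length in range(len(buf_lower), 0, -1): if any(...): return length;  return 0
def altGo (buf_lower : String) (targets : List String) : List Int → Int
  | [] => 0
  | length :: rest =>
    if altHit buf_lower targets length then length else altGo buf_lower targets rest

-- longest = 0; for t in targets: longest = max(longest, len(t));
-- start = min(len(buf_lower), longest - 1); then the descending scan
def max_partial_suffix_py_alt (buf_lower : String) (targets : List String) : Int :=
  let longest := targets.foldl (fun m t => max m (PySem.Str.len t)) 0
  let start := min (PySem.Str.len buf_lower) (longest - 1)
  altGo buf_lower targets (PySem.List.pyRange start 0 (-1))

-- ===== PRECONDITION & SPEC =====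
def Spec_max_partial_suffix_py (buf_lower : String) (targets : List String) (out : Int) : Prop := out = max_partial_suffix_py_alt buf_lower targets
instance (buf_lower : String) (targets : List String) (out : Int) : Decidable (Spec_max_partial_suffix_py buf_lower targets out) := by unfold Spec_max_partial_suffix_py; infer_instance

-- ===== CLAIM (what is proved, stated in full; the proofs are below) =====
def Claim_equal_max_partial_suffix_py : Prop := ∀ (buf_lower : String) (targets : List String), Dom_max_partial_suffix_py buf_lower targets → Spec_max_partial_suffix_py buf_lower targets (max_partial_suffix_py buf_lower targets)

-- ===== LEMMAS AND PROOFS =====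

-- A's per-target cap min(len(buf), max(0, len(t)-1)) with the buffer part replaced by a parameter k
def pvCap (t : String) : Int := max 0 (PySem.Str.len t - 1)

-- per-target first match over the descending range capped at k
def pvH (buf_lower t : String) (k : Int) : Int :=
  pyA_inner t buf_lower 0 (PySem.List.pyRange (min k (pvCap t)) 0 (-1))

theorem pvFoldl_max_le (l : List Int) (a b : Int) (hab : a ≤ b) (h : ∀ x ∈ l, x ≤ b) :
    l.foldl max a ≤ b := by
  induction l generalizing a with
  | nil => simpa using hab
  | cons x xs ih =>
    exact ih (max a x) (max_le hab (h x (by simp))) (fun y hy => h y (by simp [hy]))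

theorem pvInner_shift (t buf : String) (r : List Int) :
    ∀ m : Int, 0 ≤ m → (∀ L ∈ r, 0 < L) →
    pyA_inner t buf m r = max m (pyA_inner t buf 0 r) := by
  induction r with
  | nil => intro m hm _; simp [pyA_inner, max_eq_left hm]
  | cons L rest ih =>
    intro m hm hr
    have hL : 0 < L := hr L (by simp)
    simp only [pyA_inner]
    split_ifs with h
    · rw [max_eq_right hL.le]
    · exact ih m hm (fun x hx => hr x (by simp [hx]))

theorem pvInner_bounds (t buf : String) (k : Int) (r : List Int) :
    ∀ a : Int, 0 ≤ a → a ≤ k → (∀ L ∈ r, 0 ≤ L ∧ L ≤ k) →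
    0 ≤ pyA_inner t buf a r ∧ pyA_inner t buf a r ≤ k := by
  induction r with
  | nil => intro a ha hak _; exact ⟨ha, hak⟩
  | cons L rest ih =>
    intro a ha hak hr
    obtain ⟨h0, hk⟩ := hr L (by simp)
    simp only [pyA_inner]
    split_ifs with h
    · exact ⟨le_max_of_le_left ha, max_le hak hk⟩
    · exact ih a ha hak (fun x hx => hr x (by simp [hx]))

theorem pvFoldl_max_eq_zero (l : List Int) (h : ∀ x ∈ l, x ≤ 0) : l.foldl max 0 = 0 :=
  le_antisymm (pvFoldl_max_le l 0 0 le_rfl h) (PySem.List.le_foldl_max l 0).1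

theorem pvH_bounds (buf t : String) (k : Int) (hk : 0 ≤ k) :
    0 ≤ pvH buf t k ∧ pvH buf t k ≤ k := by
  apply pvInner_bounds t buf k _ 0 le_rfl hk
  intro L hL
  rw [PySem.List.mem_pyRange_neg_one] at hL
  exact ⟨hL.1.le, hL.2.trans (min_le_left _ _)⟩

theorem pvLen_nonneg (t : String) : 0 ≤ PySem.Str.len t := by
  rw [PySem.Str.len_eq]; positivity

theorem pvH_step (buf t : String) (k : Int) (hk : 0 ≤ k) :
    pvH buf t (k + 1) =
      if (decide (k + 1 < PySem.Str.len t) &&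
          PySem.Str.startswith t (PySem.Str.slice buf (some (-(k + 1))) none)) = true
      then k + 1 else pvH buf t k := by
  have hcap : 0 ≤ pvCap t := le_max_left _ _
  by_cases hc : k + 1 ≤ pvCap t
  · have hlen : k + 1 < PySem.Str.len t := by
      have := pvLen_nonneg t
      simp only [pvCap] at hc
      omega
    have h1 : min (k + 1) (pvCap t) = k + 1 := min_eq_left hc
    have h2 : min k (pvCap t) = k := min_eq_left (by omega)
    simp only [pvH, h1, h2]
    rw [PySem.List.pyRange_neg_one_cons (by omega)]
    simp only [pyA_inner, add_sub_cancel_right]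
    rw [decide_eq_true hlen, Bool.true_and]
    split_ifs with hs
    · omega
    · rfl
  · have hlen : ¬ (k + 1 < PySem.Str.len t) := by
      simp only [pvCap] at hc
      have := pvLen_nonneg t
      omega
    have h1 : min (k + 1) (pvCap t) = pvCap t := min_eq_right (by omega)
    have h2 : min k (pvCap t) = pvCap t := min_eq_right (by simp only [pvCap] at hc ⊢; omega)
    simp only [pvH, h1, h2]
    rw [decide_eq_false hlen, Bool.false_and]
    simp

theorem pvMain (buf : String) (ts : List String) (k : Nat) :
    altGo buf ts (PySem.List.pyRange (k : Int) 0 (-1)) =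
      (ts.map (fun t => pvH buf t (k : Int))).foldl max 0 := by
  induction k with
  | zero =>
    rw [Nat.cast_zero, PySem.List.pyRange_neg_one_eq_nil le_rfl]
    have hz : ∀ x ∈ ts.map (fun t => pvH buf t (0 : Int)), x ≤ 0 := by
      intro x hx
      obtain ⟨t, _, rfl⟩ := List.mem_map.mp hx
      exact (pvH_bounds buf t 0 le_rfl).2
    simp [altGo, pvFoldl_max_eq_zero _ hz]
  | succ k ih =>
    have hcast : ((k + 1 : Nat) : Int) = (k : Int) + 1 := by push_cast; ring
    rw [hcast, PySem.List.pyRange_neg_one_cons (by omega)]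
    have hstep : ∀ t ∈ ts, pvH buf t ((k : Int) + 1) =
        if (decide ((k : Int) + 1 < PySem.Str.len t) &&
            PySem.Str.startswith t (PySem.Str.slice buf (some (-((k : Int) + 1))) none)) = true
        then (k : Int) + 1 else pvH buf t (k : Int) :=
      fun t _ => pvH_step buf t k (by omega)
    rw [List.map_congr_left hstep]
    simp only [altGo, add_sub_cancel_right]
    by_cases hany : altHit buf ts ((k : Int) + 1) = true
    · simp only [hany, if_true]
      apply le_antisymm
      · simp only [altHit, List.any_eq_true] at hany
        obtain ⟨t0, ht0, hq⟩ := hany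
        have hmem : ((k : Int) + 1) ∈ ts.map (fun t =>
            if (decide ((k : Int) + 1 < PySem.Str.len t) &&
                PySem.Str.startswith t (PySem.Str.slice buf (some (-((k : Int) + 1))) none)) = true
            then (k : Int) + 1 else pvH buf t (k : Int)) :=
          List.mem_map.mpr ⟨t0, ht0, by rw [if_pos hq]⟩
        exact (PySem.List.le_foldl_max _ 0).2 _ hmem
      · apply pvFoldl_max_le _ _ _ (by omega)
        intro x hx
        obtain ⟨t, _, rfl⟩ := List.mem_map.mp hx
        split_ifs with h
        · exact le_rfl
        · have := pvH_bounds buf t (k : Int) (by omega)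
          omega
    · rw [Bool.of_not_eq_true hany]
      simp only [Bool.false_eq_true, if_false]
      rw [ih]
      congr 1
      apply List.map_congr_left
      intro t ht
      by_cases hq : (decide ((k : Int) + 1 < PySem.Str.len t) &&
          PySem.Str.startswith t (PySem.Str.slice buf (some (-((k : Int) + 1))) none)) = true
      · exact absurd (by simp only [altHit, List.any_eq_true]; exact ⟨t, ht, hq⟩) hany
      · rw [if_neg hq]

theorem pvAside (buf : String) (ts : List String) :
    ∀ m : Int, 0 ≤ m →
    ts.foldl (fun max_len target =>
      pyA_inner target buf max_len
        (PySem.List.pyRange (min (PySem.Str.len buf) (max 0 (PySem.Str.len target - 1))) 0 (-1))) m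
    = (ts.map (fun t => pvH buf t (PySem.Str.len buf))).foldl max m := by
  induction ts with
  | nil => intro m _; rfl
  | cons t rest ih =>
    intro m hm
    simp only [List.foldl_cons, List.map_cons]
    rw [pvInner_shift t buf _ m hm
      (by intro L hL; rw [PySem.List.mem_pyRange_neg_one] at hL; exact hL.1)]
    have hH : pyA_inner t buf 0
        (PySem.List.pyRange (min (PySem.Str.len buf) (max 0 (PySem.Str.len t - 1))) 0 (-1))
        = pvH buf t (PySem.Str.len buf) := by
      simp only [pvH, pvCap]
    rw [hH, ih (max m (pvH buf t (PySem.Str.len buf))) (le_max_of_le_left hm)]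

-- the length cap B precomputes, as the fold over the mapped lengths
theorem pvLongest_eq (ts : List String) :
    ts.foldl (fun m t => max m (PySem.Str.len t)) 0 = (ts.map PySem.Str.len).foldl max 0 := by
  rw [List.foldl_map]

-- capping the per-target scan at min(n, longest-1) does not change any pvH value
theorem pvH_cap (buf t : String) (n Lmax : Int) (hn : 0 ≤ n) (hL : 1 ≤ Lmax)
    (ht : PySem.Str.len t ≤ Lmax) :
    pvH buf t (min n (Lmax - 1)) = pvH buf t n := by
  have h0 := pvLen_nonneg t
  have hmin : min (min n (Lmax - 1)) (pvCap t) = min n (pvCap t) := by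
    simp only [pvCap]; omega
  simp only [pvH, hmin]

-- ===== VERDICT (by name: the statement is the Claim_ definition above) =====
theorem max_partial_suffix_py_spec : Claim_equal_max_partial_suffix_py := by
  intro buf ts _
  unfold Spec_max_partial_suffix_py max_partial_suffix_py max_partial_suffix_py_alt
  rw [pvAside buf ts 0 le_rfl]
  simp only [pvLongest_eq]
  have hn : 0 ≤ PySem.Str.len buf := pvLen_nonneg buf
  set n := PySem.Str.len buf with hn_def
  set Lmax := (ts.map PySem.Str.len).foldl max 0 with hL_def
  have hL0 : 0 ≤ Lmax := (PySem.List.le_foldl_max (ts.map PySem.Str.len) 0).1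
  have hLt : ∀ t ∈ ts, PySem.Str.len t ≤ Lmax := by
    intro t ht
    exact (PySem.List.le_foldl_max (ts.map PySem.Str.len) 0).2 _ (List.mem_map_of_mem ht)
  by_cases hL : Lmax = 0
  · -- every target is empty: both sides are 0
    have hs : min n (Lmax - 1) ≤ 0 := by omega
    rw [PySem.List.pyRange_neg_one_eq_nil hs]
    have hz : ∀ x ∈ ts.map (fun t => pvH buf t n), x ≤ 0 := by
      intro x hx
      obtain ⟨t, ht, rfl⟩ := List.mem_map.mp hx
      have h1 := hLt t ht
      have h2 := pvLen_nonneg t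
      have hcap : pvCap t = 0 := by simp only [pvCap]; omega
      have hmin : min n (pvCap t) = 0 := by omega
      simp [pvH, hmin, PySem.List.pyRange_neg_one_eq_nil (le_refl (0 : Int)), pyA_inner]
    rw [pvFoldl_max_eq_zero _ hz]
    rfl
  · have hs : 0 ≤ min n (Lmax - 1) := by omega
    have hcast : min n (Lmax - 1) = (((min n (Lmax - 1)).toNat : Nat) : Int) :=
      (Int.toNat_of_nonneg hs).symm
    rw [hcast, pvMain buf ts (min n (Lmax - 1)).toNat]
    congr 1
    apply List.map_congr_left
    intro t ht
    rw [← hcast, pvH_cap buf t n Lmax hn (by omega) (hLt t ht)]
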